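-- pv_equiv track=rewrite | github.com/jinhwanlazy/problem-solving | boj_28256/solution.py | solve
-- ===== SOURCE A (Python) =====
-- def solve(xs, W):
--     coords = [(0, 0), (0, 1), (0, 2), (1, 2), (2, 2), (2, 1), (2, 0), (1, 0)]
--     if xs == [8]:
--         return all(W[i][j] == 'O' for i, j in coords)
--     if len(xs) == 0:
--         return all(W[i][j] == 'X' for i, j in coords)
--
--     for i in range(8):
--         j, k = coords[i]
--         if W[j][k] == 'X':
--             break
--     res = [0]
--     for j in range(8):
--         k, l = coords[(i + j) % 8]
--         if W[k][l] == 'X':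
--             if res[-1] != 0:
--                 res.append(0)
--         else:
--             res[-1] += 1
--     if res[-1] == 0:
--         res.pop()
--     res.sort()
--     return res == xs
-- ===== SOURCE B (Python) =====
-- COORDS = [(0, 0), (0, 1), (0, 2), (1, 2), (2, 2), (2, 1), (2, 0), (1, 0)]
--
-- def solve(xs, W):
--     cells = [W[i][j] for i, j in COORDS]
--     if xs == [8]:
--         return all(c == 'O' for c in cells)
--     if len(xs) == 0:
--         return all(c == 'X' for c in cells)
--     ring = ''.join('X' if c == 'X' else 'O' for c in cells)
--     if 'X' not in ring:
--         return False  # runs would be [8], and xs == [8] was handled above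
--     start = ring.index('X')
--     rot = ring[start:] + ring[:start]
--     runs = sorted(len(s) for s in rot.split('X') if s)
--     return runs == xs
-- ===== Notes on version B (the rewrite author's own statement) =====
-- stated objective: simpler
-- what changed: B collects the 8 ring cells once, normalizes them to an X/O string, rotates it to start at the first X and reads the segment lengths off split('X'), replacing A's manual circular index walk with a mutable running accumulator list.
-- outside the precondition, e.g. on solve([8], [['A']]): A returns False, B raises IndexError; on solve([], [['A']]): A returns False, B raises IndexError
import Mathlib
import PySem

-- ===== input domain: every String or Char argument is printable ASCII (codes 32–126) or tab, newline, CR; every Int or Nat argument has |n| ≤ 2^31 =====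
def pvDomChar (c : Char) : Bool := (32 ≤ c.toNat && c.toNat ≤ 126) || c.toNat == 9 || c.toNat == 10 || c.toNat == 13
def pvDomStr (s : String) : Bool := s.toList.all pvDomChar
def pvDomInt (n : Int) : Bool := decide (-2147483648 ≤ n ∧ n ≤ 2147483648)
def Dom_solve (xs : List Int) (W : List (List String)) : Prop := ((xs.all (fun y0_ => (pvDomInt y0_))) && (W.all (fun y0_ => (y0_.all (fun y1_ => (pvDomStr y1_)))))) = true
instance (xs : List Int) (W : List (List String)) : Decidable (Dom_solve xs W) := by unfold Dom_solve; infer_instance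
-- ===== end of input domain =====

-- B replaces A's circular index walk with a mutable run accumulator by rotating the
-- normalized X/O ring to its first 'X' and reading run lengths off split('X'); objective: simpler.


-- ===== PORT A =====
-- W[p.1][p.2]; the defaults are only reached where Python raises IndexError, excluded by Pre_solve
def cellA (W : List (List String)) (p : Int × Int) : String :=
  PySem.List.pyGetD (PySem.List.pyGetD W p.1 []) p.2 ""

def coordsA : List (Int × Int) := [(0,0),(0,1),(0,2),(1,2),(2,2),(2,1),(2,0),(1,0)]

-- 'for i in range(8): j,k = coords[i]; if W[j][k] == 'X': break' — value of i afterwards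
def firstXA (W : List (List String)) : List Int → Int → Int
  | [], i => i
  | i :: rest, _ =>
    if cellA W (PySem.List.pyGetD coordsA i (0,0)) = "X" then i
    else firstXA W rest i

-- the res-building loop; res is kept reversed (head = Python's res[-1])
def ringLoopA (W : List (List String)) (i : Int) : List Int → List Int → List Int
  | [], res => res
  | j :: rest, res =>
    ringLoopA W i rest
      (if cellA W (PySem.List.pyGetD coordsA (PySem.Int.mod (i + j) 8) (0,0)) = "X" then
        (if res.headD 0 ≠ 0 then 0 :: res else res)
       else (res.headD 0 + 1) :: res.tail)

def solve (xs : List Int) (W : List (List String)) : Bool :=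
  if xs = [8] then coordsA.all (fun p => cellA W p == "O")
  else if xs.length = 0 then coordsA.all (fun p => cellA W p == "X")
  else
    let i := firstXA W (PySem.List.pyRange 0 8 1) 0
    let res := ringLoopA W i (PySem.List.pyRange 0 8 1) [0]
    let res2 := if res.headD 0 = 0 then res.tail else res
    PySem.List.sorted res2.reverse (fun x => x) false == xs

-- ===== PORT B =====
-- cells = [W[i][j] for i, j in COORDS]; defaults only reached where Python raises, excluded by Pre_solve
def cellsB (W : List (List String)) : List String :=
  ([(0,0),(0,1),(0,2),(1,2),(2,2),(2,1),(2,0),(1,0)] : List (Int × Int)).map (fun p => PySem.List.pyGetD (PySem.List.pyGetD W p.1 []) p.2 "")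

def solve_alt (xs : List Int) (W : List (List String)) : Bool :=
  let cells := cellsB W
  if xs = [8] then cells.all (fun c => c == "O")
  else if xs.length = 0 then cells.all (fun c => c == "X")
  else
    let ring : List Char := cells.map (fun c => if c = "X" then 'X' else 'O')
    if ¬ ring.contains 'X' then false
    else
      let start := ring.idxOf 'X'
      let rot := ring.drop start ++ ring.take start
      let runs := PySem.List.sorted
        (((rot.splitOn 'X').filter (fun s => ¬ s.isEmpty)).map (fun s => (s.length : Int)))
        (fun x => x) false
      runs == xs

-- ===== PRECONDITION & SPEC =====
-- Pre_solve excludes grids lacking a full 3x3 corner: A still returns False on some of them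
-- (its guard generators short-circuit before the missing cell), while B's eager cell
-- collection raises IndexError there.
def Pre_solve (xs : List Int) (W : List (List String)) : Prop :=
  3 ≤ W.length ∧ 3 ≤ (W.getD 0 []).length ∧ 3 ≤ (W.getD 1 []).length ∧ 3 ≤ (W.getD 2 []).length
instance (xs : List Int) (W : List (List String)) : Decidable (Pre_solve xs W) := by
  unfold Pre_solve; infer_instance

def pvWitness_solve : List Int × List (List String) :=
  ([1, 4], [["X", "O", "O"], ["O", "O", "O"], ["O", "X", "X"]])

def Spec_solve (xs : List Int) (W : List (List String)) (out : Bool) : Prop := out = solve_alt xs W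
instance (xs : List Int) (W : List (List String)) (out : Bool) : Decidable (Spec_solve xs W out) := by
  unfold Spec_solve; infer_instance

-- ===== CLAIM (what is proved, stated in full; the proofs are below) =====
def Claim_equal_solve : Prop := ∀ (xs : List Int) (W : List (List String)),
  Dom_solve xs W → Pre_solve xs W → Spec_solve xs W (solve xs W)

-- ===== LEMMAS AND PROOFS =====

-- Bool abstraction of the ring: us.getD m = (m-th ring cell == 'X')
def uCell (us : List Bool) (m : Int) : Bool := PySem.List.pyGetD us m false

def uFirst (us : List Bool) : List Int → Int → Int
  | [], i => i
  | i :: rest, _ => if uCell us i then i else uFirst us rest i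

def uLoop (us : List Bool) (i : Int) : List Int → List Int → List Int
  | [], res => res
  | j :: rest, res => uLoop us i rest
      (if uCell us (PySem.Int.mod (i + j) 8) then (if res.headD 0 ≠ 0 then 0 :: res else res)
       else (res.headD 0 + 1) :: res.tail)

-- A's main path on the bool ring
def runsA (us : List Bool) : List Int :=
  let i := uFirst us (PySem.List.pyRange 0 8 1) 0
  let res := uLoop us i (PySem.List.pyRange 0 8 1) [0]
  let res2 := if res.headD 0 = 0 then res.tail else res
  PySem.List.sorted res2.reverse (fun x => x) false

def ringOf (us : List Bool) : List Char := us.map (fun b => if b then 'X' else 'O')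

-- B's main path on the bool ring
def runsBval (us : List Bool) : List Int :=
  let ring := ringOf us
  let start := ring.idxOf 'X'
  let rot := ring.drop start ++ ring.take start
  PySem.List.sorted (((rot.splitOn 'X').filter (fun s => ¬ s.isEmpty)).map (fun s => (s.length : Int)))
    (fun x => x) false

def usOf (a0 a1 a2 b0 b2 c0 c1 c2 : String) : List Bool :=
  [decide (a0 = "X"), decide (a1 = "X"), decide (a2 = "X"), decide (b2 = "X"),
   decide (c2 = "X"), decide (c1 = "X"), decide (c0 = "X"), decide (b0 = "X")]

theorem keyNoX : ∀ u0 u1 u2 u3 u4 u5 u6 u7 : Bool,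
    ¬ (ringOf [u0,u1,u2,u3,u4,u5,u6,u7]).contains 'X' →
    runsA [u0,u1,u2,u3,u4,u5,u6,u7] = [8] := by decide

theorem keyAB : ∀ u0 u1 u2 u3 u4 u5 u6 u7 : Bool,
    (ringOf [u0,u1,u2,u3,u4,u5,u6,u7]).contains 'X' →
    runsA [u0,u1,u2,u3,u4,u5,u6,u7] = runsBval [u0,u1,u2,u3,u4,u5,u6,u7] := by decide

theorem cell_bridge (a0 a1 a2 b0 b1 b2 c0 c1 c2 : String) (t0 t1 t2 : List String)
    (t : List (List String)) (m : Int) (h0 : 0 ≤ m) (h8 : m < 8) :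
    (cellA ((a0::a1::a2::t0)::(b0::b1::b2::t1)::(c0::c1::c2::t2)::t)
        (PySem.List.pyGetD coordsA m (0,0)) = "X")
    ↔ uCell (usOf a0 a1 a2 b0 b2 c0 c1 c2) m = true := by
  have hm : m = 0 ∨ m = 1 ∨ m = 2 ∨ m = 3 ∨ m = 4 ∨ m = 5 ∨ m = 6 ∨ m = 7 := by omega
  rcases hm with rfl|rfl|rfl|rfl|rfl|rfl|rfl|rfl <;>
    simp [cellA, coordsA, uCell, usOf, PySem.List.pyGetD_ofNat']

theorem first_bridge (a0 a1 a2 b0 b1 b2 c0 c1 c2 : String) (t0 t1 t2 : List String)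
    (t : List (List String)) :
    ∀ (js : List Int), (∀ j ∈ js, 0 ≤ j ∧ j < 8) → ∀ i,
    firstXA ((a0::a1::a2::t0)::(b0::b1::b2::t1)::(c0::c1::c2::t2)::t) js i
      = uFirst (usOf a0 a1 a2 b0 b2 c0 c1 c2) js i := by
  intro js
  induction js with
  | nil => intro _ i; rfl
  | cons j rest ih =>
    intro h i
    have hj := h j (by simp)
    rw [firstXA, uFirst]
    by_cases hc : cellA ((a0::a1::a2::t0)::(b0::b1::b2::t1)::(c0::c1::c2::t2)::t)
        (PySem.List.pyGetD coordsA j (0,0)) = "X"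
    · rw [if_pos hc,
        if_pos ((cell_bridge a0 a1 a2 b0 b1 b2 c0 c1 c2 t0 t1 t2 t j hj.1 hj.2).mp hc)]
    · rw [if_neg hc,
        if_neg (fun hb => hc ((cell_bridge a0 a1 a2 b0 b1 b2 c0 c1 c2 t0 t1 t2 t j hj.1 hj.2).mpr hb)),
        ih (fun j' hj' => h j' (by simp [hj']))]

theorem loop_bridge (a0 a1 a2 b0 b1 b2 c0 c1 c2 : String) (t0 t1 t2 : List String)
    (t : List (List String)) :
    ∀ (js : List Int) (res : List Int) (i : Int),
    ringLoopA ((a0::a1::a2::t0)::(b0::b1::b2::t1)::(c0::c1::c2::t2)::t) i js res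
      = uLoop (usOf a0 a1 a2 b0 b2 c0 c1 c2) i js res := by
  intro js
  induction js with
  | nil => intro res i; rfl
  | cons j rest ih =>
    intro res i
    have hm0 : 0 ≤ PySem.Int.mod (i + j) 8 := PySem.Int.mod_nonneg _ (by norm_num)
    have hm8 : PySem.Int.mod (i + j) 8 < 8 := PySem.Int.mod_lt _ (by norm_num)
    rw [ringLoopA, uLoop]
    by_cases hc : cellA ((a0::a1::a2::t0)::(b0::b1::b2::t1)::(c0::c1::c2::t2)::t)
        (PySem.List.pyGetD coordsA (PySem.Int.mod (i + j) 8) (0,0)) = "X"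
    · rw [if_pos hc,
        if_pos ((cell_bridge a0 a1 a2 b0 b1 b2 c0 c1 c2 t0 t1 t2 t _ hm0 hm8).mp hc), ih]
    · rw [if_neg hc,
        if_neg (fun hb => hc ((cell_bridge a0 a1 a2 b0 b1 b2 c0 c1 c2 t0 t1 t2 t _ hm0 hm8).mpr hb)),
        ih]

theorem ring_bridge (a0 a1 a2 b0 b1 b2 c0 c1 c2 : String) (t0 t1 t2 : List String)
    (t : List (List String)) :
    (cellsB ((a0::a1::a2::t0)::(b0::b1::b2::t1)::(c0::c1::c2::t2)::t)).map
        (fun c => if c = "X" then 'X' else 'O')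
      = ringOf (usOf a0 a1 a2 b0 b2 c0 c1 c2) := by
  simp only [cellsB, List.map_cons, List.map_nil]
  simp only [pysem]
  simp [ringOf, usOf]

-- ===== VERDICT (by name: the statement is the Claim_ definition above) =====
theorem solve_spec : Claim_equal_solve := by
  intro xs W _ hpre
  unfold Spec_solve
  obtain ⟨h1, h2, h3, h4⟩ := hpre
  match W with
  | [] => simp at h1
  | [_] => simp at h1
  | [_, _] => simp at h1
  | r0 :: r1 :: r2 :: t =>
    simp only [List.getD] at h2 h3 h4
    match r0, h2 with
    | a0 :: a1 :: a2 :: t0, _ =>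
    match r1, h3 with
    | b0 :: b1 :: b2 :: t1, _ =>
    match r2, h4 with
    | c0 :: c1 :: c2 :: t2, _ =>
    by_cases hx8 : xs = [8]
    · subst hx8
      simp only [solve, solve_alt, cellA, coordsA, cellsB,
        List.all_cons, List.all_nil, List.map_cons, List.map_nil]
      simp only [pysem]
      simp
    · by_cases hx0 : xs = []
      · subst hx0
        simp only [solve, solve_alt, if_neg hx8, List.length_nil, cellA, coordsA,
          cellsB, List.all_cons, List.all_nil, List.map_cons, List.map_nil]
        simp only [pysem]
        simp
      · have hlen : ¬ xs.length = 0 := by simpa [List.length_eq_zero_iff] using hx0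
        have hF := first_bridge a0 a1 a2 b0 b1 b2 c0 c1 c2 t0 t1 t2 t
          (PySem.List.pyRange 0 8 1)
          (fun j hj => by have := (PySem.List.mem_pyRange_one).mp hj; omega) 0
        have hL := loop_bridge a0 a1 a2 b0 b1 b2 c0 c1 c2 t0 t1 t2 t
        have hR := ring_bridge a0 a1 a2 b0 b1 b2 c0 c1 c2 t0 t1 t2 t
        simp only [solve, solve_alt, if_neg hx8, if_neg hlen, hF, hL, hR]
        by_cases hcon : (ringOf (usOf a0 a1 a2 b0 b2 c0 c1 c2)).contains 'X'
        · have hk : runsA (usOf a0 a1 a2 b0 b2 c0 c1 c2)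
              = runsBval (usOf a0 a1 a2 b0 b2 c0 c1 c2) := by
            simpa [usOf] using keyAB (decide (a0 = "X")) (decide (a1 = "X")) (decide (a2 = "X"))
              (decide (b2 = "X")) (decide (c2 = "X")) (decide (c1 = "X")) (decide (c0 = "X"))
              (decide (b0 = "X")) (by simpa [usOf] using hcon)
          simp only [runsA, runsBval] at hk
          simp only [hk, if_neg (by simpa using hcon : ¬ (¬ (ringOf (usOf a0 a1 a2 b0 b2 c0 c1 c2)).contains 'X' = true))]
        · have hA : runsA (usOf a0 a1 a2 b0 b2 c0 c1 c2) = [8] := by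
            simpa [usOf] using keyNoX (decide (a0 = "X")) (decide (a1 = "X")) (decide (a2 = "X"))
              (decide (b2 = "X")) (decide (c2 = "X")) (decide (c1 = "X")) (decide (c0 = "X"))
              (decide (b0 = "X")) (by simpa [usOf] using hcon)
          simp only [runsA] at hA
          simp only [hA, if_pos (by simpa using hcon : (¬ (ringOf (usOf a0 a1 a2 b0 b2 c0 c1 c2)).contains 'X' = true))]
          simpa [beq_eq_false_iff_ne] using Ne.symm hx8
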